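-- pv_equiv track=rewrite | github.com/llegregam/Swurl | two.py | get_ycoords
-- ===== SOURCE A (Python) =====
-- def get_ycoords(sequence):
--     """Get y coordinates from sequence for the time series"""
--
--     ycoords = [0]
--     for element in sequence:
--         try:
--             if element == 'A' or element == 'G' or element == 'a' or element == 'g':
--                 ycoords.append(ycoords[-1] + 1)
--             elif element == 'C' or element == 'T' or element == 'c' or element == 't':
--                 ycoords.append(ycoords[-1] - 1)
--         except Exception:
--             raise
--     return ycoords
-- ===== SOURCE B (Python) =====
-- def get_ycoords(sequence):
--     """Get y coordinates from sequence for the time series"""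
--     # Divide and conquer: walk of a concatenation is the left walk followed by
--     # the right walk (minus its leading 0) shifted by the left walk's endpoint.
--     def walk(s):
--         if len(s) == 0:
--             return [0]
--         if len(s) == 1:
--             if s in ('A', 'G', 'a', 'g'):
--                 return [0, 1]
--             if s in ('C', 'T', 'c', 't'):
--                 return [0, -1]
--             return [0]
--         mid = len(s) // 2
--         left = walk(s[:mid])
--         right = walk(s[mid:])
--         off = left[-1]
--         return left + [off + y for y in right[1:]]
--     return walk(sequence)
-- ===== Notes on version B (the rewrite author's own statement) =====
-- stated objective: alternative
-- what changed: Replaces the single left-to-right running-sum loop by a divide-and-conquer recursion: split the sequence in half, compute each half's walk independently, and merge by offsetting the right walk by the left walk's endpoint.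
import Mathlib
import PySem

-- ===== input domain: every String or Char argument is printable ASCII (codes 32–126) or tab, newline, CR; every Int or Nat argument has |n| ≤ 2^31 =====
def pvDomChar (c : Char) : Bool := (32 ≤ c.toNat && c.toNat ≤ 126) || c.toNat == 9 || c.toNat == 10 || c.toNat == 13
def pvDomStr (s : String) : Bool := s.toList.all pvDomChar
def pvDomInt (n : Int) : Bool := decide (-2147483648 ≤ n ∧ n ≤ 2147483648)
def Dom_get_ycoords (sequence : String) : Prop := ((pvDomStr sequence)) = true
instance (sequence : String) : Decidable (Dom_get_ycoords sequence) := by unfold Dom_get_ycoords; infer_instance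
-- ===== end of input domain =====

-- B replaces A's running-sum loop by a divide-and-conquer recursion that merges half-walks
-- with an offset (objective: alternative, same exact values).
-- ===== PORT A =====
-- A's loop body: ycoords[-1] on the always-nonempty accumulator (exact: getLast?.getD is
-- PySem.List.pyGet? ys (-1) for nonempty ys, and ycoords is never empty), then append.
def pvGoA (ys : List Int) (cs : List Char) : List Int :=
  match cs with
  | [] => ys
  | c :: cs =>
      if c = 'A' ∨ c = 'G' ∨ c = 'a' ∨ c = 'g' then
        pvGoA (ys ++ [ys.getLast?.getD 0 + 1]) cs
      else if c = 'C' ∨ c = 'T' ∨ c = 'c' ∨ c = 't' then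
        pvGoA (ys ++ [ys.getLast?.getD 0 - 1]) cs
      else
        pvGoA ys cs

def get_ycoords (sequence : String) : List Int :=
  pvGoA [0] sequence.toList

-- ===== PORT B =====
-- Source B's walk: split in half, recurse on each half, shift the right walk (minus its
-- leading 0) by the left walk's endpoint (left[-1] on the nonempty left = getLast?.getD 0).
def pvWalk (s : List Char) : List Int :=
  match s with
  | [] => [0]
  | [c] =>
      if c = 'A' ∨ c = 'G' ∨ c = 'a' ∨ c = 'g' then [0, 1]
      else if c = 'C' ∨ c = 'T' ∨ c = 'c' ∨ c = 't' then [0, -1]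
      else [0]
  | c1 :: c2 :: rest =>
      let t := c1 :: c2 :: rest
      let mid := t.length / 2
      let left := pvWalk (t.take mid)
      let right := pvWalk (t.drop mid)
      let off := left.getLast?.getD 0
      left ++ right.tail.map (fun y => off + y)
  termination_by s.length
  decreasing_by
  · simp only [List.length_take, List.length_cons]; omega
  · simp only [List.length_drop, List.length_cons]; omega

def get_ycoords_alt (sequence : String) : List Int :=
  pvWalk sequence.toList

-- ===== PRECONDITION & SPEC =====
def Spec_get_ycoords (sequence : String) (out : List Int) : Prop := out = get_ycoords_alt sequence
instance (sequence : String) (out : List Int) : Decidable (Spec_get_ycoords sequence out) := by unfold Spec_get_ycoords; infer_instance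

-- ===== CLAIM (what is proved, stated in full; the proofs are below) =====
def Claim_equal_get_ycoords : Prop := ∀ (sequence : String), Dom_get_ycoords sequence → Spec_get_ycoords sequence (get_ycoords sequence)

-- ===== LEMMAS AND PROOFS =====

-- the common reference form: per-character steps, then the prefix-sum walk
def pvSteps (cs : List Char) : List Int :=
  cs.filterMap (fun c =>
    if c = 'A' ∨ c = 'G' ∨ c = 'a' ∨ c = 'g' then some 1
    else if c = 'C' ∨ c = 'T' ∨ c = 'c' ∨ c = 't' then some (-1)
    else none)

-- A's loop from accumulator ys ++ [v] appends exactly scanl (+) v (pvSteps cs)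
theorem pvGoA_eq (cs : List Char) : ∀ (ys : List Int) (v : Int),
    pvGoA (ys ++ [v]) cs = ys ++ List.scanl (· + ·) v (pvSteps cs) := by
  induction cs with
  | nil => intro ys v; simp [pvGoA, pvSteps]
  | cons c cs ih =>
      intro ys v
      by_cases h1 : c = 'A' ∨ c = 'G' ∨ c = 'a' ∨ c = 'g'
      · have : (ys ++ [v]) ++ [(ys ++ [v]).getLast?.getD 0 + 1] = (ys ++ [v]) ++ [v + 1] := by simp
        simp only [pvGoA, pvSteps, List.filterMap_cons, if_pos h1, this, ih]
        simp [List.scanl]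
      · by_cases h2 : c = 'C' ∨ c = 'T' ∨ c = 'c' ∨ c = 't'
        · have : (ys ++ [v]) ++ [(ys ++ [v]).getLast?.getD 0 - 1] = (ys ++ [v]) ++ [v - 1] := by simp
          simp only [pvGoA, pvSteps, List.filterMap_cons, if_neg h1, if_pos h2, this, ih]
          simp [List.scanl, sub_eq_add_neg]
        · simp only [pvGoA, pvSteps, List.filterMap_cons, if_neg h1, if_neg h2, ih]

theorem getLast?_cons_ne (x : Int) (l : List Int) (h : l ≠ []) :
    (x :: l).getLast? = l.getLast? := by
  cases l with
  | nil => exact absurd rfl h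
  | cons b t => exact List.getLast?_cons_cons

theorem scanl_ne_nil (a : Int) (l : List Int) : List.scanl (· + ·) a l ≠ [] := by
  cases l <;> simp [List.scanl_nil, List.scanl_cons]

theorem scanl_append (A B : List Int) : ∀ (a : Int),
    List.scanl (· + ·) a (A ++ B) =
      List.scanl (· + ·) a A ++ (List.scanl (· + ·) (A.foldl (· + ·) a) B).tail := by
  induction A with
  | nil =>
      intro a
      cases B <;> simp [List.scanl_nil, List.scanl_cons]
  | cons x A ih =>
      intro a
      simp only [List.cons_append, List.scanl_cons, List.foldl_cons, ih]

theorem scanl_shift (B : List Int) : ∀ (w b : Int),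
    List.scanl (· + ·) (w + b) B = (List.scanl (· + ·) b B).map (fun y => w + y) := by
  induction B with
  | nil => intro w b; simp [List.scanl_nil]
  | cons y B ih =>
      intro w b
      simp only [List.scanl_cons, List.map_cons]
      rw [add_assoc, ih]

theorem getLast_scanl (A : List Int) : ∀ (a : Int),
    (List.scanl (· + ·) a A).getLast?.getD 0 = A.foldl (· + ·) a := by
  induction A with
  | nil => intro a; simp [List.scanl_nil]
  | cons x A ih =>
      intro a
      rw [List.scanl_cons, getLast?_cons_ne _ _ (scanl_ne_nil _ _)]
      exact ih _

theorem pvSteps_append (l₁ l₂ : List Char) : pvSteps (l₁ ++ l₂) = pvSteps l₁ ++ pvSteps l₂ := by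
  simp [pvSteps]

theorem pvWalk_eq (s : List Char) : pvWalk s = List.scanl (· + ·) 0 (pvSteps s) := by
  induction s using pvWalk.induct with
  | case1 => simp [pvWalk, pvSteps, List.scanl_nil]
  | case2 c h1 =>
      simp [pvWalk, pvSteps, List.scanl_cons, List.scanl_nil, h1]
  | case3 c h1 h2 =>
      simp [pvWalk, pvSteps, List.scanl_nil, h1, h2]
  | case4 c h1 h2 =>
      simp [pvWalk, pvSteps, List.scanl_nil, h1, h2]
  | case5 c1 c2 rest t mid ihl ihr =>
      simp only [pvWalk]
      rw [ihl, ihr]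
      conv_rhs => rw [← List.take_append_drop ((c1 :: c2 :: rest).length / 2) (c1 :: c2 :: rest)]
      rw [pvSteps_append, scanl_append, ← getLast_scanl]
      congr 1
      have h2 := scanl_shift (pvSteps ((c1 :: c2 :: rest).drop ((c1 :: c2 :: rest).length / 2)))
        ((List.scanl (· + ·) 0 (pvSteps ((c1 :: c2 :: rest).take ((c1 :: c2 :: rest).length / 2)))).getLast?.getD 0) 0
      simp only [add_zero] at h2
      rw [h2, ← List.map_tail]

theorem get_ycoords_spec : Claim_equal_get_ycoords := by
  intro sequence _
  show get_ycoords sequence = get_ycoords_alt sequence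
  have hA := pvGoA_eq sequence.toList [] 0
  simp only [List.nil_append] at hA
  rw [get_ycoords, hA, get_ycoords_alt, pvWalk_eq]
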